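-- pv_equiv track=rewrite | github.com/Drogalion01/Codes-of-lifetime | _hypothesis.py | logic_fixed_pref
-- ===== SOURCE A (Python) =====
-- def logic_fixed_pref(n,h,k,a):
--     tmp=[(0,0)]*n
--     for i in range(n):
--         itx=max(a[i:])
--         itn=min(a[:i+1])
--         tmp[i]=(itx,itn)
--     s=sum(a)
--     cy=h//s
--     t=cy*n+max(0,cy-1)*k
--     if h%s==0:
--         return t
--     if cy>0:
--         t+=k
--     rem=h%s
--     pref=[0]*(n+1)
--     for i in range(n):
--         pref[i+1]=pref[i]+a[i]
--     for i in range(1,n+1):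
--         hobe=pref[i]-tmp[i-1][1]+tmp[i-1][0]
--         if hobe>=rem:
--             return t+1
--         t+=1
--     return None
-- ===== SOURCE B (Python) =====
-- def logic_fixed_pref(n, h, k, a):
--     s = sum(a)
--     cy = h // s
--     t = cy * n + max(0, cy - 1) * k
--     rem = h % s
--     if rem == 0:
--         return t
--     if cy > 0:
--         t += k
--     # suffix maxima of a in one backward pass (suf[i] == max(a[i:]))
--     suf = [0] * len(a)
--     m = None
--     for i in range(len(a) - 1, -1, -1):
--         if m is None or a[i] > m:
--             m = a[i]
--         suf[i] = m
--     # single forward pass keeping running prefix sum and running minimum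
--     p = 0
--     pmin = None
--     for i in range(n):
--         x = a[i]
--         p += x
--         if pmin is None or x < pmin:
--             pmin = x
--         if p - pmin + suf[i] >= rem:
--             return t + i + 1
--     return None
-- ===== Notes on version B (the rewrite author's own statement) =====
-- stated objective: faster
-- what changed: Replaces the O(n^2) per-index rescans max(a[i:])/min(a[:i+1]) and the separate prefix-sum array by one backward suffix-max pass plus one forward pass carrying the running prefix sum and running minimum.
import Mathlib
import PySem

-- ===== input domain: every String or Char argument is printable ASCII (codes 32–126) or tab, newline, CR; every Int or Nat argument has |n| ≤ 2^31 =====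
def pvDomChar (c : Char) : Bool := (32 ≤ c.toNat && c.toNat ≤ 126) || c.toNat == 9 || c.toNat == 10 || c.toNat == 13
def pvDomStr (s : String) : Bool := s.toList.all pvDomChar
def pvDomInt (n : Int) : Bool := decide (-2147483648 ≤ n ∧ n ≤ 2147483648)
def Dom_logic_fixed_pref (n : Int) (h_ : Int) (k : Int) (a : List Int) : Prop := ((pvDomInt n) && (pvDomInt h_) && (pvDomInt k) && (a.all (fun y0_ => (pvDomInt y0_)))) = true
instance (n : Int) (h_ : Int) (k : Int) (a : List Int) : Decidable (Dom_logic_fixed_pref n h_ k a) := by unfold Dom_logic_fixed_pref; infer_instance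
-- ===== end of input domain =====

-- B replaces A's quadratic per-index rescans (max(a[i:]), min(a[:i+1])) and separate prefix
-- array by one backward suffix-max pass plus one forward pass with running sum/min (objective: faster).

-- ===== PORT A =====
-- final loop of A: for i in range(1, n+1): hobe = pref[i] - tmp[i-1][1] + tmp[i-1][0]; early return t+1
def loopA (pref : List Int) (tmp : List (Int × Int)) (rem : Int) : List Int → Int → Option Int
  | [], _ => none
  | i :: rest, t =>
    let pair := PySem.List.pyGetD tmp (i - 1) (0, 0)
    let hobe := PySem.List.pyGetD pref i 0 - pair.2 + pair.1
    if hobe ≥ rem then some (t + 1) else loopA pref tmp rem rest (t + 1)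

def logic_fixed_pref (n : Int) (h_ : Int) (k : Int) (a : List Int) : Option Int :=
  -- tmp = [(0,0)]*n; for i in range(n): tmp[i] = (max(a[i:]), min(a[:i+1]))
  let tmp := (PySem.List.pyRange 0 n 1).foldl
    (fun tm i =>
      let itx := (PySem.List.max? (PySem.List.slice a (some i) none) (fun y => y)).getD 0
      let itn := (PySem.List.min? (PySem.List.slice a none (some (i + 1))) (fun y => y)).getD 0
      PySem.List.pySetD tm i (itx, itn))
    (List.replicate n.toNat ((0 : Int), (0 : Int)))
  let s := a.sum
  let cy := PySem.Int.floordiv h_ s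
  let t := cy * n + max 0 (cy - 1) * k
  if PySem.Int.mod h_ s = 0 then some t
  else
    let t := if cy > 0 then t + k else t
    let rem := PySem.Int.mod h_ s
    -- pref = [0]*(n+1); for i in range(n): pref[i+1] = pref[i] + a[i]
    let pref := (PySem.List.pyRange 0 n 1).foldl
      (fun pr i => PySem.List.pySetD pr (i + 1) (PySem.List.pyGetD pr i 0 + PySem.List.pyGetD a i 0))
      (List.replicate (n + 1).toNat (0 : Int))
    loopA pref tmp rem (PySem.List.pyRange 1 (n + 1) 1) t

-- ===== PORT B =====
-- backward pass: suf[i] = max(a[i:])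
def sufMax : List Int → List Int
  | [] => []
  | x :: xs =>
    match sufMax xs with
    | [] => [x]
    | m :: ms => (if x > m then x else m) :: m :: ms

-- forward pass over (a[i], suf[i]) carrying running prefix sum p and running minimum pmin
def loopB : List (Int × Int) → Int → Int → Option Int → Int → Option Int
  | [], _, _, _, _ => none
  | (x, sm) :: rest, rem, p, pmin?, t =>
    let p' := p + x
    let pmin := match pmin? with
      | none => x
      | some m => if x < m then x else m
    if p' - pmin + sm ≥ rem then some (t + 1) else loopB rest rem p' (some pmin) (t + 1)

def logic_fixed_pref_alt (n : Int) (h_ : Int) (k : Int) (a : List Int) : Option Int :=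
  let s := a.sum
  let cy := PySem.Int.floordiv h_ s
  let t := cy * n + max 0 (cy - 1) * k
  let rem := PySem.Int.mod h_ s
  if rem = 0 then some t
  else
    let t := if cy > 0 then t + k else t
    loopB ((a.zip (sufMax a)).take n.toNat) rem 0 none t

-- ===== PRECONDITION & SPEC =====
-- Pre_ excludes exactly the inputs where Python A raises: n > len(a) (max()/min() of an empty
-- slice, ValueError) and sum(a) == 0 (ZeroDivisionError).
def Pre_logic_fixed_pref (n : Int) (h_ : Int) (k : Int) (a : List Int) : Prop :=
  n ≤ (a.length : Int) ∧ a.sum ≠ 0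
instance (n : Int) (h_ : Int) (k : Int) (a : List Int) : Decidable (Pre_logic_fixed_pref n h_ k a) := by unfold Pre_logic_fixed_pref; infer_instance
def pvWitness_logic_fixed_pref : Int × Int × Int × List Int := (2, 5, 1, [1, 2])

def Spec_logic_fixed_pref (n : Int) (h_ : Int) (k : Int) (a : List Int) (out : Option Int) : Prop := out = logic_fixed_pref_alt n h_ k a
instance (n : Int) (h_ : Int) (k : Int) (a : List Int) (out : Option Int) : Decidable (Spec_logic_fixed_pref n h_ k a out) := by unfold Spec_logic_fixed_pref; infer_instance

-- ===== CLAIM (what is proved, stated in full; the proofs are below) =====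
def Claim_equal_logic_fixed_pref : Prop := ∀ (n : Int) (h_ : Int) (k : Int) (a : List Int), Dom_logic_fixed_pref n h_ k a → Pre_logic_fixed_pref n h_ k a → Spec_logic_fixed_pref n h_ k a (logic_fixed_pref n h_ k a)

-- ===== LEMMAS AND PROOFS =====

-- common shape of both early-return loops: first index whose value reaches rem
def firstHit : List Int → Int → Int → Option Int
  | [], _, _ => none
  | h :: hs, rem, t => if h ≥ rem then some (t + 1) else firstHit hs rem (t + 1)

theorem loopA_eq_firstHit (pref : List Int) (tmp : List (Int × Int)) (rem : Int)
    (l : List Int) (t : Int) :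
    loopA pref tmp rem l t = firstHit (l.map (fun i =>
      PySem.List.pyGetD pref i 0 - (PySem.List.pyGetD tmp (i - 1) ((0:Int), (0:Int))).2
        + (PySem.List.pyGetD tmp (i - 1) ((0:Int), (0:Int))).1)) rem t := by
  induction l generalizing t with
  | nil => rfl
  | cons i rest ih =>
      simp only [loopA, firstHit, List.map]
      split_ifs <;> simp [ih]

-- the list of hobe values loopB tests, as a function of the carried state
def hobesB : List (Int × Int) → Int → Option Int → List Int
  | [], _, _ => []
  | (x, sm) :: rest, p, pmin? =>
    let p' := p + x
    let pmin := match pmin? with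
      | none => x
      | some m => if x < m then x else m
    (p' - pmin + sm) :: hobesB rest p' (some pmin)

theorem loopB_eq_firstHit (rows : List (Int × Int)) (rem p : Int) (pmin? : Option Int) (t : Int) :
    loopB rows rem p pmin? t = firstHit (hobesB rows p pmin?) rem t := by
  induction rows generalizing p pmin? t with
  | nil => rfl
  | cons r rest ih =>
      obtain ⟨x, sm⟩ := r
      simp only [loopB, hobesB, firstHit]
      split_ifs <;> simp [ih]

theorem length_hobesB (rows : List (Int × Int)) (p : Int) (pmin? : Option Int) :
    (hobesB rows p pmin?).length = rows.length := by
  induction rows generalizing p pmin? with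
  | nil => rfl
  | cons r rest ih => obtain ⟨x, sm⟩ := r; simp [hobesB, ih]

-- running minimum seeded by an optional accumulator
def minAcc : Option Int → List Int → Int
  | some m, l => l.foldl min m
  | none, [] => 0
  | none, x :: l => l.foldl min x

theorem hobesB_getElem (rows : List (Int × Int)) (p : Int) (pmin? : Option Int)
    (j : Nat) (hj : j < rows.length) :
    (hobesB rows p pmin?)[j]'(by rw [length_hobesB]; exact hj) =
      p + ((rows.take (j + 1)).map Prod.fst).sum
        - minAcc pmin? ((rows.take (j + 1)).map Prod.fst)
        + (rows[j]'hj).2 := by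
  induction rows generalizing p pmin? j with
  | nil => simp at hj
  | cons r rest ih =>
      obtain ⟨x, sm⟩ := r
      cases j with
      | zero =>
          cases pmin? with
          | none => simp [hobesB, minAcc]; try ring
          | some m =>
              have hmx : (if x < m then x else m) = min m x := by
                simp [min_def]; omega
              simp [hobesB, minAcc, hmx]; try ring
      | succ j' =>
          have hj' : j' < rest.length := by simpa using hj
          simp only [hobesB, List.take_succ_cons, List.map_cons, List.sum_cons,
            List.getElem_cons_succ]
          rw [ih _ _ j' hj']
          have hmin : minAcc (some (match pmin? with
              | none => x
              | some m => if x < m then x else m)) ((rest.take (j' + 1)).map Prod.fst)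
              = minAcc pmin? (x :: (rest.take (j' + 1)).map Prod.fst) := by
            cases pmin? with
            | none => simp [minAcc]
            | some m =>
                simp only [minAcc, List.foldl_cons]
                have : (if x < m then x else m) = min m x := by
                  simp [min_def]; omega
                rw [this]
          rw [hmin]; ring

-- sufMax computes the suffix maxima
def tailsMax : List Int → List Int
  | [] => []
  | x :: xs => (xs.foldl max x) :: tailsMax xs

theorem foldl_max_swap (ys : List Int) (x y : Int) :
    ys.foldl max (max x y) = max x (ys.foldl max y) := by
  induction ys generalizing y with
  | nil => rfl
  | cons z zs ih => simp only [List.foldl_cons, max_assoc, ih]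

theorem sufMax_eq_tailsMax (a : List Int) : sufMax a = tailsMax a := by
  induction a with
  | nil => rfl
  | cons x xs ih =>
      cases xs with
      | nil => rfl
      | cons y ys =>
          have h1 : sufMax (x :: y :: ys) = match sufMax (y :: ys) with
            | [] => [x]
            | m :: ms => (if x > m then x else m) :: m :: ms := rfl
          have hx : (if x > ys.foldl max y then x else ys.foldl max y) = max x (ys.foldl max y) := by
            simp [max_def]; omega
          rw [h1, ih]
          simp only [tailsMax, List.foldl_cons]
          rw [hx, ← foldl_max_swap]

theorem length_tailsMax (a : List Int) : (tailsMax a).length = a.length := by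
  induction a with
  | nil => rfl
  | cons x xs ih => simp [tailsMax, ih]

theorem tailsMax_getElem (a : List Int) (j : Nat) (hj : j < a.length) :
    (tailsMax a)[j]'(by rw [length_tailsMax]; exact hj) =
      ((PySem.List.max? (a.drop j) (fun y => y)).getD 0) := by
  induction a generalizing j with
  | nil => simp at hj
  | cons x xs ih =>
      cases j with
      | zero => simp [tailsMax, PySem.List.max?_id_cons]
      | succ j' =>
          have hj' : j' < xs.length := by simpa using hj
          simpa [tailsMax] using ih j' hj'

theorem minAcc_none_eq (l : List Int) (hl : l ≠ []) :
    minAcc none l = (PySem.List.min? l (fun y => y)).getD 0 := by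
  cases l with
  | nil => exact absurd rfl hl
  | cons x xs => simp [minAcc, PySem.List.min?_id_cons]

theorem set_append_len {α : Type} (xs : List α) (y v : α) (ys : List α) :
    (xs ++ y :: ys).set xs.length v = xs ++ v :: ys := by
  induction xs with
  | nil => rfl
  | cons z zs ih => simp [ih]

theorem fill_aux (g : Int → (Int × Int)) (N M : Nat) (hM : M ≤ N) :
    (PySem.List.pyRange 0 (M : Int) 1).foldl
        (fun tm i => PySem.List.pySetD tm i (g i)) (List.replicate N ((0:Int), (0:Int)))
      = (List.range M).map (fun (j : Nat) => g (j : Int)) ++ List.replicate (N - M) ((0:Int), (0:Int)) := by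
  induction M with
  | zero => simp [PySem.List.pyRange_one_eq_nil]
  | succ M ih =>
      have hM' : M ≤ N := Nat.le_of_succ_le hM
      have hsplit : PySem.List.pyRange 0 ((M+1 : Nat) : Int) 1
          = PySem.List.pyRange 0 (M : Int) 1 ++ [(M : Int)] := by
        push_cast
        exact PySem.List.pyRange_one_succ_right (by positivity)
      rw [hsplit, List.foldl_append, ih hM']
      have hrep : List.replicate (N - M) ((0:Int), (0:Int))
          = ((0:Int),(0:Int)) :: List.replicate (N - (M+1)) ((0:Int), (0:Int)) := by
        have h2 : N - M = (N - (M+1)) + 1 := by omega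
        rw [h2, List.replicate_succ]
      simp only [List.foldl_cons, List.foldl_nil, hrep, PySem.List.pySetD_natCast]
      have hset : (((List.range M).map (fun (j : Nat) => g (j : Int)))
            ++ ((0:Int),(0:Int)) :: List.replicate (N - (M+1)) ((0:Int),(0:Int))).set M (g (M : Int))
          = ((List.range M).map (fun (j : Nat) => g (j : Int)))
            ++ (g (M : Int)) :: List.replicate (N - (M+1)) ((0:Int),(0:Int)) := by
        have h3 := set_append_len ((List.range M).map (fun (j : Nat) => g (j : Int)))
          ((0:Int),(0:Int)) (g (M : Int)) (List.replicate (N - (M+1)) ((0:Int), (0:Int)))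
        simpa using h3
      rw [hset, List.range_succ]
      simp

theorem pref_aux (a : List Int) (N M : Nat) (hM : M ≤ N) (hN : N ≤ a.length) :
    (PySem.List.pyRange 0 (M : Int) 1).foldl
        (fun pr i => PySem.List.pySetD pr (i + 1)
          (PySem.List.pyGetD pr i 0 + PySem.List.pyGetD a i 0))
        (List.replicate (N + 1) (0 : Int))
      = (List.range (M + 1)).map (fun j => ((a.take j).sum : Int))
          ++ List.replicate (N - M) (0 : Int) := by
  induction M with
  | zero => simp [PySem.List.pyRange_one_eq_nil, List.replicate_succ]
  | succ M ih =>
      have hM' : M ≤ N := Nat.le_of_succ_le hM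
      have hMa : M < a.length := by omega
      have hsplit : PySem.List.pyRange 0 ((M+1 : Nat) : Int) 1
          = PySem.List.pyRange 0 (M : Int) 1 ++ [(M : Int)] := by
        push_cast
        exact PySem.List.pyRange_one_succ_right (by positivity)
      rw [hsplit, List.foldl_append, ih hM']
      have hrep : List.replicate (N - M) (0:Int)
          = (0:Int) :: List.replicate (N - (M+1)) (0:Int) := by
        have h2 : N - M = (N - (M+1)) + 1 := by omega
        rw [h2, List.replicate_succ]
      simp only [List.foldl_cons, List.foldl_nil, hrep]
      have hcast : (M : Int) + 1 = ((M + 1 : Nat) : Int) := by push_cast; ring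
      have hget1 : PySem.List.pyGetD ((List.range (M + 1)).map (fun j => ((a.take j).sum : Int))
          ++ (0:Int) :: List.replicate (N - (M+1)) (0:Int)) (M : Int) 0 = (a.take M).sum := by
        rw [PySem.List.pyGetD_natCast, List.getD_append _ _ _ _ (by simp)]
        exact PySem.List.getD_map_range _ _ _ _ (by omega)
      have hget2 : PySem.List.pyGetD a (M : Int) 0 = a[M] := by
        rw [PySem.List.pyGetD_natCast]
        exact List.getD_eq_getElem a 0 hMa
      rw [hget1, hget2, hcast, PySem.List.pySetD_natCast]
      have hset : (((List.range (M+1)).map (fun j => ((a.take j).sum : Int)))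
            ++ (0:Int) :: List.replicate (N - (M+1)) (0:Int)).set (M+1)
              ((a.take M).sum + a[M])
          = ((List.range (M+1)).map (fun j => ((a.take j).sum : Int)))
            ++ ((a.take M).sum + a[M]) :: List.replicate (N - (M+1)) (0:Int) := by
        have h3 := set_append_len ((List.range (M+1)).map (fun j => ((a.take j).sum : Int)))
          (0:Int) ((a.take M).sum + a[M]) (List.replicate (N - (M+1)) (0:Int))
        simpa using h3
      rw [hset, List.range_succ]
      have hsum : ((a.take (M+1)).sum : Int) = (a.take M).sum + a[M] :=
        List.sum_take_succ a M hMa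
      simp [List.range_succ, hsum]

theorem take_zip' {α β : Type} (a : List α) (b : List β) (m : Nat) :
    (a.zip b).take m = (a.take m).zip (b.take m) := by
  induction a generalizing b m with
  | nil => simp
  | cons x xs ih =>
      cases b with
      | nil => simp
      | cons y ys =>
          cases m with
          | zero => simp
          | succ m' => simp [List.zip_cons_cons, ih]

theorem firstHit_congr (l1 l2 : List Int) (h : l1 = l2) (rem t : Int) :
    firstHit l1 rem t = firstHit l2 rem t := by rw [h]

-- ===== VERDICT (by name: the statement is the Claim_ definition above) =====
theorem logic_fixed_pref_spec : Claim_equal_logic_fixed_pref := by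
  intro n h_ k a _hdom hpre
  obtain ⟨hn, hs⟩ := hpre
  unfold Spec_logic_fixed_pref logic_fixed_pref logic_fixed_pref_alt
  by_cases hmod : PySem.Int.mod h_ a.sum = 0
  · simp only [hmod, if_true]
  · simp only [hmod, if_false]
    rw [loopA_eq_firstHit, loopB_eq_firstHit]
    apply firstHit_congr
    by_cases hn0 : n ≤ 0
    · have h1 : PySem.List.pyRange 1 (n + 1) 1 = [] :=
        PySem.List.pyRange_one_eq_nil (by omega)
      have h2 : n.toNat = 0 := by omega
      simp [h1, h2, hobesB]
    · -- 0 < n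
      have hNn : n = ((n.toNat : Nat) : Int) := by omega
      set N := n.toNat with hN
      have hNa : N ≤ a.length := by omega
      have hsufl : (sufMax a).length = a.length := by
        rw [sufMax_eq_tailsMax]; exact length_tailsMax a
      have hrowsl : ((a.zip (sufMax a)).take N).length = N := by
        simp [List.length_take, List.length_zip, hsufl]; omega
      have htmp : ((PySem.List.pyRange 0 n 1).foldl
          (fun tm i =>
            let itx := (PySem.List.max? (PySem.List.slice a (some i) none) (fun y => y)).getD 0
            let itn := (PySem.List.min? (PySem.List.slice a none (some (i + 1))) (fun y => y)).getD 0
            PySem.List.pySetD tm i (itx, itn))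
          (List.replicate n.toNat ((0 : Int), (0 : Int))))
          = (List.range N).map (fun j =>
              ((PySem.List.max? (PySem.List.slice a (some ((j : Nat) : Int)) none) (fun y => y)).getD 0,
               (PySem.List.min? (PySem.List.slice a none (some (((j : Nat) : Int) + 1))) (fun y => y)).getD 0)) := by
        rw [hNn]
        have h0 := fill_aux (fun i =>
          ((PySem.List.max? (PySem.List.slice a (some i) none) (fun y => y)).getD 0,
           (PySem.List.min? (PySem.List.slice a none (some (i + 1))) (fun y => y)).getD 0)) N N le_rfl
        simp only [Nat.sub_self, List.replicate_zero, List.append_nil, Int.toNat_natCast] at h0 ⊢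
        exact h0
      have hpref : ((PySem.List.pyRange 0 n 1).foldl
          (fun pr i => PySem.List.pySetD pr (i + 1)
            (PySem.List.pyGetD pr i 0 + PySem.List.pyGetD a i 0))
          (List.replicate (n + 1).toNat (0 : Int)))
          = (List.range (N + 1)).map (fun j => ((a.take j).sum : Int)) := by
        rw [hNn]
        have hcast : (((N : Int)) + 1).toNat = N + 1 := by omega
        rw [hcast]
        have h0 := pref_aux a N N le_rfl hNa
        simp only [Nat.sub_self, List.replicate_zero, List.append_nil] at h0
        exact h0
      rw [htmp, hpref]
      apply List.ext_getElem
      · simp [PySem.List.length_pyRange_one, length_hobesB, hrowsl]; omega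
      · intro j hj1 hj2
        have hjN : j < N := by
          simp [PySem.List.length_pyRange_one] at hj1
          omega
        have hja : j < a.length := by omega
        have hrow : j < ((a.zip (sufMax a)).take N).length := by omega
        rw [List.getElem_map, hobesB_getElem _ _ _ j hrow]
        rw [PySem.List.getElem_pyRange_one]
        -- A side indices
        have hidx1 : (1 : Int) + (j : Nat) - 1 = ((j : Nat) : Int) := by ring
        have hidx2 : (1 : Int) + (j : Nat) = (((j + 1 : Nat)) : Int) := by push_cast; ring
        rw [hidx1, hidx2]
        rw [PySem.List.pyGetD_natCast, PySem.List.pyGetD_natCast]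
        rw [PySem.List.getD_map_range _ _ _ _ (by omega),
            PySem.List.getD_map_range _ _ _ _ (by omega)]
        -- rows[j]
        have hrows_get : ((a.zip (sufMax a)).take N)[j]'hrow
            = (a[j]'hja, (sufMax a)[j]'(by omega)) := by
          rw [List.getElem_take, List.getElem_zip]
        -- take of rows
        have htake : (((a.zip (sufMax a)).take N).take (j + 1)).map Prod.fst = a.take (j + 1) := by
          rw [List.take_take]
          have : min (j + 1) N = j + 1 := by omega
          rw [this, take_zip', List.map_fst_zip (by simp [hsufl])]
        rw [hrows_get, htake]
        -- suffix max value
        have hsuf : (sufMax a)[j]'(by omega)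
            = (PySem.List.max? (a.drop j) (fun y => y)).getD 0 := by
          have := tailsMax_getElem a j hja
          simp only [sufMax_eq_tailsMax]
          exact this
        rw [hsuf]
        -- slices
        rw [PySem.List.slice_from_natCast]
        have hslice2 : PySem.List.slice a none (some (((j : Nat) : Int) + 1))
            = a.take (j + 1) := by
          have : ((j : Nat) : Int) + 1 = (((j + 1 : Nat)) : Int) := by push_cast; ring
          rw [this, PySem.List.slice_to_natCast]
        rw [hslice2]
        -- running min = min? of prefix
        have hne : a.take (j + 1) ≠ [] := by
          have : (a.take (j + 1)).length = j + 1 := by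
            simp [List.length_take]; omega
          intro hnil; rw [hnil] at this; simp at this
        rw [minAcc_none_eq _ hne]
        ring
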